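-- pv_equiv track=rewrite | github.com/alexandraback/datacollection | solutions_2692487_1/Python/frececroka/app.py | solve
-- ===== SOURCE A (Python) =====
-- def solve( motes, armin_size ):
-- 	motes.sort()
--
-- 	removals = 0
-- 	min_changes = -1
-- 	armin_size_initial = armin_size
--
-- 	if armin_size == 1:
-- 		return len( motes )
--
-- 	while True:
-- 		changes = removals
-- 		armin_size = armin_size_initial
--
-- 		for m in motes:
-- 			# add a mote while armin is too small to eat any mote
-- 			while( m >= armin_size ):
-- 				armin_size += ( armin_size - 1 )
-- 				changes += 1
--
-- 			armin_size += m
--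
-- 		if min_changes < 0 or changes < min_changes:
-- 			min_changes = changes
--
-- 		if len( motes ) == 0:
-- 			break
--
-- 		# pop last (biggest) mote
-- 		motes.pop()
-- 		removals += 1
--
-- 	return min_changes
-- ===== SOURCE B (Python) =====
-- def solve(motes, armin_size):
--     # Single pass over the sorted motes: keep the cumulative number of
--     # additions needed for each prefix, and take the minimum over all
--     # split points of (additions for the prefix) + (removals of the suffix).
--     # Note: unlike A, B does not mutate the caller's list.
--     n = len(motes)
--     if armin_size == 1:
--         return n
--     ms = sorted(motes)
--     best = n          # empty prefix: remove everything
--     adds = 0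
--     size = armin_size
--     rem = n
--     for m in ms:
--         rem -= 1
--         while m >= size:
--             size += size - 1
--             adds += 1
--         size += m
--         best = min(best, adds + rem)
--     return best
-- ===== Notes on version B (the rewrite author's own statement) =====
-- stated objective: alternative
-- what changed: A re-simulates the whole absorb process from scratch for every possible number of removals; B sorts once and makes a single forward pass recording the cumulative number of additions per sorted prefix, taking the minimum of additions+removals over all split points; B also does not mutate the caller's list (A sorts it and empties it by popping).
-- outside the precondition, e.g. on solve([-6, -5], 2): A returns 0, B returns 0
import Mathlib
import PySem

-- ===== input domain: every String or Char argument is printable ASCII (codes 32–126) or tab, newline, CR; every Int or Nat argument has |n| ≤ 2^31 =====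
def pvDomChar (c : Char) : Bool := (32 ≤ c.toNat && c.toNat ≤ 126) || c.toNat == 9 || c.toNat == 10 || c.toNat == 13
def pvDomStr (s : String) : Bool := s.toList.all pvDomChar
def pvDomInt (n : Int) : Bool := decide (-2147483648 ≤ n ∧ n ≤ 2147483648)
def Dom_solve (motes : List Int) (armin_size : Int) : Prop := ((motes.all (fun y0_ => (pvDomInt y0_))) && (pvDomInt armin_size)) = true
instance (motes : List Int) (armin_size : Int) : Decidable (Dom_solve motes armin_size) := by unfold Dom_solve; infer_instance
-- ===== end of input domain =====

-- B replaces A's per-removal full re-simulation by one forward pass over the sorted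
-- motes with cumulative additions per prefix; the equivalence is about the RETURN
-- value only: A sorts and empties the caller's list in place, B does not mutate it.

-- ===== PORT A =====

-- the inner `while m >= armin_size` loop, shared verbatim by both Pythons;
-- fuel 64 suffices on Pre_ (size - 1 at least doubles each step, motes ≤ 2^31)
def pvGrow : Nat → Int → Int → Int → Int × Int
  | 0, _, size, changes => (size, changes)
  | fuel + 1, m, size, changes =>
    if m ≥ size then pvGrow fuel m (size + (size - 1)) (changes + 1) else (size, changes)

-- A's `for m in motes` body as a fold step over the state (armin_size, changes)
def pvStep (p : Int × Int) (m : Int) : Int × Int :=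
  let q := pvGrow 64 m p.1 p.2
  (q.1 + m, q.2)

-- one iteration of A's `while True`: changes = removals, re-simulate from scratch
def pvSimA (ms : List Int) (armin0 removals : Int) : Int :=
  (List.foldl pvStep (armin0, removals) ms).2

-- A's outer loop: update min_changes, pop the last mote, repeat until empty
def pvOuterA (armin0 : Int) : List Int → Int → Int → Int
  | ms, removals, minc =>
    let changes := pvSimA ms armin0 removals
    let minc' := if minc < 0 ∨ changes < minc then changes else minc
    if h : ms = [] then minc'
    else pvOuterA armin0 ms.dropLast (removals + 1) minc'
  termination_by ms => ms.length
  decreasing_by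
    have hp := List.length_pos_of_ne_nil h
    simp [List.length_dropLast]; omega

def solve (motes : List Int) (armin_size : Int) : Int :=
  let ms := PySem.List.sorted motes (fun x => x) false
  if armin_size = 1 then (ms.length : Int)
  else pvOuterA armin_size ms 0 (-1)

-- ===== PORT B =====

-- B's single forward pass: state (size, adds, best, rem = motes still ahead)
def pvBLoop : List Int → Int → Int → Int → Int → Int
  | [], _, _, best, _ => best
  | m :: t, size, adds, best, rem =>
    let rem' := rem - 1
    let p := pvGrow 64 m size adds
    pvBLoop t (p.1 + m) p.2 (min best (p.2 + rem')) rem'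

def solve_alt (motes : List Int) (armin_size : Int) : Int :=
  let n : Int := motes.length
  if armin_size = 1 then n
  else pvBLoop (PySem.List.sorted motes (fun x => x) false) armin_size 0 n n

-- ===== PRECONDITION & SPEC =====
-- Pre_ excludes inputs on which A's absorb loop can run forever (a mote ≥ the current
-- size while the size is ≤ 1); the guard `armin_size + (sum of negative motes) ≥ 2` is
-- slightly conservative, so a few inputs on which A still returns are excluded too.
def Pre_solve (motes : List Int) (armin_size : Int) : Prop :=
  armin_size = 1 ∨ motes = [] ∨ 2 ≤ armin_size + (motes.filter (fun m => m < 0)).sum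
instance (motes : List Int) (armin_size : Int) : Decidable (Pre_solve motes armin_size) := by
  unfold Pre_solve; infer_instance

def pvWitness_solve : List Int × Int := ([3, 1, 5], 2)

def Spec_solve (motes : List Int) (armin_size : Int) (out : Int) : Prop := out = solve_alt motes armin_size
instance (motes : List Int) (armin_size : Int) (out : Int) : Decidable (Spec_solve motes armin_size out) := by unfold Spec_solve; infer_instance

-- ===== CLAIM (what is proved, stated in full; the proofs are below) =====
def Claim_equal_solve : Prop := ∀ (motes : List Int) (armin_size : Int), Dom_solve motes armin_size → Pre_solve motes armin_size → Spec_solve motes armin_size (solve motes armin_size)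

-- ===== LEMMAS AND PROOFS =====

-- the simulation state after the first k sorted motes
def pvSt (s : List Int) (a0 : Int) (k : Nat) : Int × Int :=
  List.foldl pvStep (a0, 0) (s.take k)

-- cost of keeping the first k motes and removing the rest
def pvG (s : List Int) (a0 : Int) (k : Nat) : Int :=
  ((s.length : Int) - k) + (pvSt s a0 k).2

-- running minimum of pvG over split points 0..k
def pvM (s : List Int) (a0 : Int) : Nat → Int
  | 0 => pvG s a0 0
  | k + 1 => min (pvG s a0 (k + 1)) (pvM s a0 k)

theorem pvGrow_add (fn : Nat) (m size c : Int) :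
    pvGrow fn m size c = ((pvGrow fn m size 0).1, c + (pvGrow fn m size 0).2) := by
  induction fn generalizing size c with
  | zero => simp [pvGrow]
  | succ f ih =>
    simp only [pvGrow]
    split
    · rw [ih (size + (size - 1)) (c + 1), ih (size + (size - 1)) (0 + 1)]
      simp; ring
    · simp

theorem pvGrow_le (fn : Nat) (m size c : Int) : c ≤ (pvGrow fn m size c).2 := by
  induction fn generalizing size c with
  | zero => simp [pvGrow]
  | succ f ih =>
    simp only [pvGrow]
    split
    · exact le_trans (by omega) (ih (size + (size - 1)) (c + 1))
    · simp

theorem pvStep_le (p : Int × Int) (m : Int) : p.2 ≤ (pvStep p m).2 := by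
  simpa [pvStep] using pvGrow_le 64 m p.1 p.2

theorem foldl_pvStep_le (l : List Int) (p : Int × Int) : p.2 ≤ (List.foldl pvStep p l).2 := by
  induction l generalizing p with
  | nil => simp
  | cons m t ih => exact le_trans (pvStep_le p m) (by simpa using ih (pvStep p m))

theorem pvStep_add (sz c m : Int) :
    pvStep (sz, c) m = ((pvStep (sz, 0) m).1, c + (pvStep (sz, 0) m).2) := by
  simp only [pvStep]
  rw [pvGrow_add 64 m sz c, pvGrow_add 64 m sz 0]

theorem foldl_pvStep_add (l : List Int) (sz c : Int) :
    List.foldl pvStep (sz, c) l =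
      ((List.foldl pvStep (sz, 0) l).1, c + (List.foldl pvStep (sz, 0) l).2) := by
  induction l generalizing sz c with
  | nil => simp
  | cons m t ih =>
    simp only [List.foldl_cons]
    rw [pvStep_add sz c m, pvStep_add sz 0 m]
    simp only [zero_add]
    rw [ih (pvStep (sz, 0) m).1 (c + (pvStep (sz, 0) m).2),
        ih (pvStep (sz, 0) m).1 (pvStep (sz, 0) m).2]
    simp
    ring

theorem pvSimA_eq (ms : List Int) (a0 r : Int) :
    pvSimA ms a0 r = r + (List.foldl pvStep (a0, 0) ms).2 := by
  simp [pvSimA, foldl_pvStep_add ms a0 r]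

theorem pvSt_zero_le (s : List Int) (a0 : Int) (k : Nat) : 0 ≤ (pvSt s a0 k).2 := by
  simpa using foldl_pvStep_le (s.take k) (a0, 0)

theorem pvG_nonneg (s : List Int) (a0 : Int) (k : Nat) (hk : k ≤ s.length) :
    0 ≤ pvG s a0 k := by
  have h1 : (0:Int) ≤ (s.length : Int) - k := by
    have := hk; omega
  have h2 := pvSt_zero_le s a0 k
  unfold pvG; omega

theorem dropLast_take_succ (s : List Int) (k : Nat) (hk : k + 1 ≤ s.length) :
    (s.take (k + 1)).dropLast = s.take k := by
  rw [List.dropLast_eq_take, List.length_take, List.take_take]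
  congr 1
  omega

theorem pvSimA_take (s : List Int) (a0 r : Int) (k : Nat) :
    pvSimA (s.take k) a0 r = r + (pvSt s a0 k).2 := by
  rw [pvSimA_eq]; rfl

theorem pvOuterA_take (s : List Int) (a0 : Int) :
    ∀ k : Nat, k ≤ s.length → ∀ minc : Int,
      pvOuterA a0 (s.take k) ((s.length : Int) - k) minc =
        if minc < 0 then pvM s a0 k else min minc (pvM s a0 k) := by
  intro k
  induction k with
  | zero =>
    intro _ minc
    rw [pvOuterA]
    have hM : pvM s a0 0 = (s.length : Int) := by simp [pvM, pvG, pvSt]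
    simp only [List.take_zero, pvSimA, List.foldl_nil, Nat.cast_zero, sub_zero, hM, dite_eq_ite, if_pos trivial]
    simp only [min_def]
    split_ifs <;> omega
  | succ k ih =>
    intro hk minc
    rw [pvOuterA]
    simp only [pvSimA_take]
    have hchg : ((s.length : Int) - (k + 1 : Nat)) + (pvSt s a0 (k + 1)).2 = pvG s a0 (k + 1) := by
      unfold pvG; push_cast; ring
    have hne : s.take (k + 1) ≠ [] := by
      have hlen : (s.take (k + 1)).length = k + 1 := by
        rw [List.length_take]; omega
      intro h
      rw [h] at hlen
      simp at hlen
    have hrem : ((s.length : Int) - (k + 1 : Nat)) + 1 = (s.length : Int) - k := by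
      push_cast; ring
    have hMk1 : pvM s a0 (k + 1) = min (pvG s a0 (k + 1)) (pvM s a0 k) := rfl
    rw [hchg, dif_neg hne, dropLast_take_succ s k hk, hrem, ih (by omega), hMk1]
    have hG := pvG_nonneg s a0 (k + 1) hk
    simp only [min_def]
    split_ifs <;> omega

theorem pvBLoop_eq (s : List Int) (a0 : Int) :
    ∀ t : List Int, ∀ k : Nat, s.drop k = t → k ≤ s.length → ∀ best : Int,
      pvBLoop t (pvSt s a0 k).1 (pvSt s a0 k).2 best ((s.length : Int) - k) =
        List.foldl (fun acc j => min acc (pvG s a0 j)) best (List.range' (k + 1) (s.length - k)) := by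
  intro t
  induction t with
  | nil =>
    intro k h hk best
    have hlen : s.length ≤ k := List.drop_eq_nil_iff.mp h
    have : s.length - k = 0 := by omega
    rw [this]
    simp [pvBLoop]
  | cons m t' ih =>
    intro k h hk best
    have hk1 : k < s.length := by
      by_contra hc
      rw [List.drop_eq_nil_iff.mpr (by omega)] at h
      simp at h
    have hget : s[k]? = some m := by
      rw [← List.head?_drop, h]
      rfl
    have hdrop : s.drop (k + 1) = t' := by
      rw [← List.tail_drop, h]
      rfl
    have hstep : pvSt s a0 (k + 1) = pvStep (pvSt s a0 k) m := by
      unfold pvSt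
      rw [List.take_add_one, hget, List.foldl_append]
      rfl
    have hbest : (pvGrow 64 m (pvSt s a0 k).1 (pvSt s a0 k).2).2 + ((s.length : Int) - ↑k - 1) =
        pvG s a0 (k + 1) := by
      have h2 : (pvSt s a0 (k + 1)).2 = (pvGrow 64 m (pvSt s a0 k).1 (pvSt s a0 k).2).2 := by
        rw [hstep]; rfl
      unfold pvG
      rw [h2]
      push_cast
      ring
    have hsz : (pvSt s a0 (k + 1)).1 = (pvGrow 64 m (pvSt s a0 k).1 (pvSt s a0 k).2).1 + m := by
      rw [hstep]; rfl
    have hcnt : s.length - k = (s.length - (k + 1)) + 1 := by omega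
    rw [pvBLoop, hcnt, List.range'_succ, List.foldl_cons]
    have hrem : ((s.length : Int) - ↑k) - 1 = (s.length : Int) - ↑(k + 1) := by
      push_cast; ring
    rw [hbest, hrem, ← hsz]
    have h2 : (pvSt s a0 (k + 1)).2 = (pvGrow 64 m (pvSt s a0 k).1 (pvSt s a0 k).2).2 := by
      rw [hstep]; rfl
    rw [← h2]
    exact ih (k + 1) hdrop (by omega) (min best (pvG s a0 (k + 1)))

theorem pvM_fold (s : List Int) (a0 : Int) (k : Nat) :
    pvM s a0 k = List.foldl (fun acc j => min acc (pvG s a0 j)) (pvG s a0 0) (List.range' 1 k) := by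
  induction k with
  | zero => rfl
  | succ k ih =>
    rw [List.range'_concat, List.foldl_append, ← ih]
    simp only [List.foldl_cons, List.foldl_nil, one_mul]
    rw [show pvM s a0 (k + 1) = min (pvG s a0 (k + 1)) (pvM s a0 k) from rfl,
      Nat.add_comm 1 k, min_comm]

-- ===== VERDICT (by name: the statement is the Claim_ definition above) =====
theorem solve_spec : Claim_equal_solve := by
  intro motes armin _dom _pre
  unfold Spec_solve solve solve_alt
  have hlen : (PySem.List.sorted motes (fun x => x) false).length = motes.length :=
    PySem.List.length_sorted motes (fun x => x) false
  by_cases h1 : armin = 1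
  · simp [h1, hlen]
  · simp only [if_neg h1]
    have hst0 : pvSt (PySem.List.sorted motes (fun x => x) false) armin 0 = (armin, 0) := rfl
    have hg0 : pvG (PySem.List.sorted motes (fun x => x) false) armin 0 =
        ((PySem.List.sorted motes (fun x => x) false).length : Int) := by
      simp [pvG, hst0]
    have hA : pvOuterA armin (PySem.List.sorted motes (fun x => x) false) 0 (-1) =
        pvM (PySem.List.sorted motes (fun x => x) false) armin
          (PySem.List.sorted motes (fun x => x) false).length := by
      have h := pvOuterA_take (PySem.List.sorted motes (fun x => x) false) armin
        (PySem.List.sorted motes (fun x => x) false).length le_rfl (-1)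
      rw [List.take_length] at h
      simpa using h
    have hB := pvBLoop_eq (PySem.List.sorted motes (fun x => x) false) armin
      (PySem.List.sorted motes (fun x => x) false) 0 rfl (Nat.zero_le _) ((motes.length : Int))
    rw [hst0] at hB
    simp only [Nat.cast_zero, sub_zero, Nat.sub_zero] at hB
    rw [hlen] at hB
    rw [hA, pvM_fold, hg0, hlen, hB]
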